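-- pv_equiv track=rewrite | github.com/AlexKotl/stepik-python-lessons | 2/lottery.py | gen_ticket_number
-- ===== SOURCE A (Python) =====
-- def gen_ticket_number(count, series, length=6):
--     """
--     генератор номеров билетов, входные параметры: count - количество билетов,
--     series - номер серии, необязательный аргумент length - количество цифр
--     в номере, по умолчанию равен 6, выход - строка вида: <номер билета> <серия билета>
--     """
--
--     series_gen = gen_series(series)
--     number_gen = gen_number(length)
--
--     total = 0
--     for serie in gen_series(series):
--         for number in gen_number(length):
--             if total >= count:
--                 return
--             total += 1
--             yield number + ' ' + serie
--
-- def gen_series(series):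
--     """
--     генератор серий лотерейных билетов начиная с series по "ZZ" включительно, входные
--     параметры: series -  - номер серии, выход - строка, состоящая из двух заглавных
--     букв латинского алфавита
--     """
--
--     series = series.upper()
--     while series != 'ZZ':
--         yield series
--         if series[1] == 'Z':
--             series = chr(ord(series[0]) + 1) + 'A'
--         else:
--             series = series[0] + chr(ord(series[1]) + 1)
--     yield series # output last series
--
-- def gen_number(length=6):
--     """
--     генератор номеров лотерейных билетов в одной серии, входные параметры:
--     необязательный аргумент length - количество цифр в номере, по умолчанию равен 6
--     """
--
--     number = 0
--     while number < 10**length - 1: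
--         number += 1
--         yield f'{number:0{length}d}'
-- ===== SOURCE B (Python) =====
-- def gen_ticket_number(count, series, length=6):
--     """
--     Index-driven re-implementation: the chain of series from `series` up to 'ZZ'
--     is produced by range arithmetic over character codes instead of a carry loop,
--     and each ticket i is located directly via divmod(i, numbers_per_series).
--     """
--     u = series.upper()
--     s0, s1 = ord(u[0]), ord(u[1])
--     series_list = [u] \
--         + [chr(s0) + chr(c) for c in range(s1 + 1, 91)] \
--         + [chr(a) + chr(b) for a in range(s0 + 1, 91) for b in range(65, 91)]
--     per = 10 ** length - 1
--     n = min(count, len(series_list) * per)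
--     for i in range(n):
--         s_idx, n_idx = divmod(i, per)
--         yield f'{n_idx + 1:0{length}d} {series_list[s_idx]}'
-- ===== Notes on version B (the rewrite author's own statement) =====
-- stated objective: alternative
-- what changed: Replaces A's nested generators (carry-loop series generator around a counting number generator with a running total and early return) by a precomputed arithmetic series table (range arithmetic over character codes) plus a single divmod-indexed pass over range(min(count, capacity)).
-- outside the precondition, e.g. on gen_ticket_number(5, 'AB', -1): A returns [], B raises TypeError; on gen_ticket_number(1, 'A', 1): A returns ['1 A'], B raises IndexError
import Mathlib
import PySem

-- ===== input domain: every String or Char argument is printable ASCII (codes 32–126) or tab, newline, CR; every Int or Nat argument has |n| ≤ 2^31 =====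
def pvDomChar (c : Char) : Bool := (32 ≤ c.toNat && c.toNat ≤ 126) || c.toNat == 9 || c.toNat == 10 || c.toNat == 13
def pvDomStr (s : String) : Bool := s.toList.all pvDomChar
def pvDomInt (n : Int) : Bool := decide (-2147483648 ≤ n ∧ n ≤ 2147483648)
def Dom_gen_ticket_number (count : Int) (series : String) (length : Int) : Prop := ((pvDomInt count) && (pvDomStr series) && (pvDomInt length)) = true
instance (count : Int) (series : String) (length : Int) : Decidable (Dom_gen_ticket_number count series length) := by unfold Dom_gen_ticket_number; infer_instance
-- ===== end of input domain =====

-- B replaces A's nested generator loops by an arithmetic series table plus one divmod-indexed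
-- pass (objective: alternative). Both programs are Python generators; the compared value is
-- the produced sequence of strings.

-- ===== PORT A =====
-- f'{n:0{length}d}' for the positive n both programs format (= str(n).zfill(length))
def pvFmt (length n : Int) : String := PySem.Str.zfill (PySem.Int.toStr n) length

-- one carry step of gen_series: chr(ord(s[0])+1)+'A' / s[0]+chr(ord(s[1])+1)
def pvStepA (s : List Char) : List Char :=
  match s with
  | c0 :: c1 :: _ => if c1 = 'Z' then [Char.ofNat (c0.toNat + 1), 'A'] else [c0, Char.ofNat (c1.toNat + 1)]
  | _ => []

-- A's inner 'for number in gen_number(length)' loop, consumed lazily with A's early-return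
-- check; returns (yielded items, new total, early-return flag)
def pvInnerA (count per length : Int) (serie : String) (total number : Int) :
    List String × Int × Bool :=
  if _h : number < per then
    let number' := number + 1
    if count ≤ total then ([], total, true)
    else
      let r := pvInnerA count per length serie (total + 1) number'
      ((pvFmt length number' ++ " " ++ serie) :: r.1, r.2.1, r.2.2)
  else ([], total, false)
  termination_by (per - number).toNat
  decreasing_by omega

-- A's outer 'for serie in gen_series(series)' loop; the fuel only makes the loop total:
-- inside Pre_ the Python loop performs at most 2458 outer iterations (see the proofs below)
def pvOuterA (fuel : Nat) (count per length : Int) (s : List Char) (total : Int) : List String :=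
  match fuel with
  | 0 => []
  | fuel + 1 =>
    let r := pvInnerA count per length (String.ofList s) total 0
    if r.2.2 then r.1
    else if s = ['Z', 'Z'] then r.1
    else r.1 ++ pvOuterA fuel count per length (pvStepA s) r.2.1

def gen_ticket_number (count : Int) (series : String) (length : Int) : List String :=
  let per : Int := 10 ^ length.toNat - 1          -- the bound 10**length - 1 of gen_number
  pvOuterA 5000 count per length (PySem.Str.upper series).toList 0

-- ===== PORT B =====
def gen_ticket_number_alt (count : Int) (series : String) (length : Int) : List String :=
  let u := PySem.Str.upper series
  let s0 : Nat := (u.toList.getD 0 'A').toNat     -- ord(u[0]); default unreachable inside Pre_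
  let s1 : Nat := (u.toList.getD 1 'A').toNat     -- ord(u[1])
  let series_list : List String :=
    [u]
    ++ (PySem.List.pyRange ((s1 : Int) + 1) 91).map
         (fun c => String.ofList [Char.ofNat s0, Char.ofNat c.toNat])
    ++ (PySem.List.pyRange ((s0 : Int) + 1) 91).flatMap
         (fun a => (PySem.List.pyRange 65 91).map
           (fun b => String.ofList [Char.ofNat a.toNat, Char.ofNat b.toNat]))
  let per : Int := 10 ^ length.toNat - 1
  let n : Int := min count ((series_list.length : Int) * per)
  (PySem.List.pyRange 0 n).map (fun i =>
    pvFmt length (PySem.Int.mod i per + 1) ++ " "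
      ++ PySem.List.pyGetD series_list (PySem.Int.floordiv i per) "")

-- ===== PRECONDITION & SPEC =====
-- Pre_ excludes: negative length (A returns [] through a float artefact of 10**length while
-- B's range() raises TypeError); series of fewer than 2 characters (B raises IndexError where
-- A may still return); and series whose upper-cased first two characters lie beyond 'Z' —
-- where A's carry loop walks past the alphabet, emitting punctuation series or diverging —
-- unless the requested count stays within the first series (that slice is kept: both agree).
def Pre_gen_ticket_number (count : Int) (series : String) (length : Int) : Prop :=
  0 ≤ length ∧ 2 ≤ (PySem.Str.upper series).toList.length ∧
  ((((PySem.Str.upper series).toList.getD 0 'A').toNat ≤ 90 ∧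
    ((PySem.Str.upper series).toList.getD 1 'A').toNat ≤ 90 ∧
    ((PySem.Str.upper series).toList.length = 2 ∨
      ¬((PySem.Str.upper series).toList.getD 0 'A' = 'Z' ∧
        (PySem.Str.upper series).toList.getD 1 'A' = 'Z')))
   ∨ (1 ≤ length ∧ count ≤ 10 ^ length.toNat - 2))
instance (count : Int) (series : String) (length : Int) : Decidable (Pre_gen_ticket_number count series length) := by unfold Pre_gen_ticket_number; infer_instance

def pvWitness_gen_ticket_number : Int × String × Int := (5, "AB", 2)

def Spec_gen_ticket_number (count : Int) (series : String) (length : Int) (out : List String) : Prop := out = gen_ticket_number_alt count series length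
instance (count : Int) (series : String) (length : Int) (out : List String) : Decidable (Spec_gen_ticket_number count series length out) := by unfold Spec_gen_ticket_number; infer_instance

-- ===== CLAIM (what is proved, stated in full; the proofs are below) =====
def Claim_equal_gen_ticket_number : Prop := ∀ (count : Int) (series : String) (length : Int), Dom_gen_ticket_number count series length → Pre_gen_ticket_number count series length → Spec_gen_ticket_number count series length (gen_ticket_number count series length)

-- ===== LEMMAS AND PROOFS =====

-- the tickets of one series: what A's inner loop yields when the cap does not cut it short
def pvTickets (length per : Int) (serie : String) : List String :=
  (List.range per.toNat).map (fun (k : Nat) => pvFmt length ((k : Int) + 1) ++ " " ++ serie)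

-- the chain of series produced by gen_series, fuel-bounded exactly like pvOuterA
def pvChain (fuel : Nat) (s : List Char) : List String :=
  match fuel with
  | 0 => []
  | fuel + 1 => String.ofList s :: (if s = ['Z', 'Z'] then [] else pvChain fuel (pvStepA s))

-- B's two range blocks, named for the proofs
def pvMid (a : Char) (bcode : Nat) : List String :=
  (PySem.List.pyRange ((bcode : Int) + 1) 91).map (fun c => String.ofList [a, Char.ofNat c.toNat])

def pvTail (acode : Nat) : List String :=
  (PySem.List.pyRange ((acode : Int) + 1) 91).flatMap
    (fun x => (PySem.List.pyRange 65 91).map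
      (fun y => String.ofList [Char.ofNat x.toNat, Char.ofNat y.toNat]))

lemma char_toNat_ofNat (n : Nat) (h : n < 200) : (Char.ofNat n).toNat = n := by
  have hv : n.isValidChar := Or.inl (by omega)
  rw [Char.ofNat, dif_pos hv]
  rfl

lemma char_eq_of_toNat (a b : Char) (h : a.toNat = b.toNat) : a = b := by
  have := congrArg Char.ofNat h
  rwa [Char.ofNat_toNat, Char.ofNat_toNat] at this

lemma pvTickets_length (length per : Int) (serie : String) :
    (pvTickets length per serie).length = per.toNat := by
  simp [pvTickets]
lemma pvInnerA_spec (count per length : Int) (serie : String) (total number : Int)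
    (h0 : 0 ≤ number) (h1 : number ≤ per) (ht : total ≤ count) :
    pvInnerA count per length serie total number =
      (((pvTickets length per serie).drop number.toNat).take (count - total).toNat,
       total + min (count - total) (per - number),
       decide (count - total < per - number)) := by
  by_cases h : number < per
  · rw [pvInnerA, dif_pos h]
    by_cases hc : count ≤ total
    · rw [if_pos hc]
      have : (count - total).toNat = 0 := by omega
      simp only [this, List.take_zero]
      refine Prod.ext rfl (Prod.ext ?_ ?_) <;> simp <;> omega
    · rw [if_neg hc]
      have IH := pvInnerA_spec count per length serie (total + 1) (number + 1)
        (by omega) (by omega) (by omega)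
      simp only [IH]
      have hdrop : (pvTickets length per serie).drop number.toNat =
          (pvFmt length (number + 1) ++ " " ++ serie) ::
            (pvTickets length per serie).drop (number + 1).toNat := by
        have hlen : number.toNat < (pvTickets length per serie).length := by
          simp [pvTickets]; omega
        have hidx : number.toNat < per.toNat := by
          simpa only [pvTickets, List.length_map, List.length_range] using hlen
        rw [List.drop_eq_getElem_cons hlen]
        congr 1
        · simp only [pvTickets, List.getElem_map, List.getElem_range]
          rw [Int.toNat_of_nonneg h0]
        · congr 1
          omega
      rw [hdrop]
      have htak : (count - total).toNat = (count - (total+1)).toNat + 1 := by omega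
      rw [htak, List.take_succ_cons]
      refine Prod.ext rfl (Prod.ext ?_ ?_) <;> simp <;> omega
  · rw [pvInnerA, dif_neg h]
    have hnp : number = per := by omega
    have hdrop : (pvTickets length per serie).drop number.toNat = [] := by
      apply List.drop_eq_nil_of_le
      simp [pvTickets]; omega
    rw [hdrop]
    simp only [List.take_nil]
    refine Prod.ext rfl (Prod.ext ?_ ?_) <;> simp <;> omega
  termination_by (per - number).toNat
  decreasing_by omega

lemma pvOuterA_spec (fuel : Nat) (count per length : Int) (s : List Char) (total : Int)
    (hper : 0 ≤ per) (ht : total ≤ count) :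
    pvOuterA fuel count per length s total =
      ((pvChain fuel s).flatMap (pvTickets length per)).take (count - total).toNat := by
  induction fuel generalizing s total with
  | zero => simp [pvOuterA, pvChain]
  | succ fuel IH =>
    rw [pvOuterA, pvChain]
    rw [pvInnerA_spec count per length (String.ofList s) total 0 le_rfl hper ht]
    simp only [Int.toNat_zero, List.drop_zero, List.flatMap_cons]
    by_cases hstop : count - total < per
    · rw [if_pos (by simpa using hstop)]
      rw [List.take_append_of_le_length]
      rw [pvTickets_length]; omega
    · rw [if_neg (by simpa using hstop)]
      have hfull : (pvTickets length per (String.ofList s)).take (count - total).toNat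
          = pvTickets length per (String.ofList s) := by
        apply List.take_of_length_le
        rw [pvTickets_length]; omega
      by_cases hzz : s = ['Z', 'Z']
      · rw [if_pos hzz, if_pos hzz]
        simp only [List.flatMap_nil, List.append_nil]
      · rw [if_neg hzz, if_neg hzz]
        have hmin : min (count - total) (per - 0) = per := by omega
        rw [hmin, IH (pvStepA s) (total + per) (by omega)]
        rw [List.take_append, hfull, pvTickets_length]
        congr 2
        omega

lemma pvChain_two (f : Nat) (a b : Char) (rest : List Char) (ha : a.toNat ≤ 90) (hb : b.toNat ≤ 90)
    (hr : rest = [] ∨ ¬(a = 'Z' ∧ b = 'Z'))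
    (hf : (91 - a.toNat) * 26 + (91 - b.toNat) ≤ f) :
    pvChain f (a :: b :: rest) = String.ofList (a :: b :: rest) :: (pvMid a b.toNat ++ pvTail a.toNat) := by
  induction f generalizing a b rest with
  | zero => omega
  | succ f IH =>
    rw [pvChain]
    by_cases hzz : (a :: b :: rest : List Char) = ['Z', 'Z']
    · rw [if_pos hzz]
      rw [List.cons.injEq, List.cons.injEq] at hzz
      have ha90 : a.toNat = 90 := by rw [hzz.1]; decide
      have hb90 : b.toNat = 90 := by rw [hzz.2.1]; decide
      rw [pvMid, pvTail, ha90, hb90]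
      norm_num [PySem.List.pyRange_one_eq_nil]
    · rw [if_neg hzz]
      by_cases hbz : b = 'Z'
      · -- carry: next state is [chr(ord(a)+1), 'A']
        have haz : a.toNat ≠ 90 := by
          intro h90
          have haZ : a = 'Z' := char_eq_of_toNat a 'Z' (by rw [h90]; decide)
          rcases hr with h | h
          · exact hzz (by rw [haZ, hbz, h])
          · exact h ⟨haZ, hbz⟩
        have hstep : pvStepA (a :: b :: rest) = [Char.ofNat (a.toNat + 1), 'A'] := by
          rw [pvStepA, if_pos hbz]
        have hta : (Char.ofNat (a.toNat + 1)).toNat = a.toNat + 1 :=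
          char_toNat_ofNat _ (by omega)
        rw [hstep, IH (Char.ofNat (a.toNat + 1)) 'A' [] (by omega) (by decide) (Or.inl rfl)
            (by
              rw [hta]
              have h65 : 'A'.toNat = 65 := by decide
              have hb90 : b.toNat = 90 := by rw [hbz]; decide
              rw [h65]
              omega)]
        rw [hta]
        congr 1
        -- pvMid a 90 = [] and pvTail a = block(a+1) ++ pvTail (a+1)
        rw [hbz]
        have hmid : pvMid a 'Z'.toNat = [] := by
          rw [pvMid]
          have : ('Z'.toNat : Int) + 1 = 91 := by decide
          rw [this, PySem.List.pyRange_one_eq_nil (by omega)]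
          rfl
        have hmidA : pvMid (Char.ofNat (a.toNat + 1)) 'A'.toNat =
            (PySem.List.pyRange 66 91).map
              (fun y => String.ofList [Char.ofNat (a.toNat + 1), Char.ofNat y.toNat]) := by
          rw [pvMid]
          have h66 : ('A'.toNat : Int) + 1 = 66 := by decide
          rw [h66]
        have htail : pvTail a.toNat =
            ((PySem.List.pyRange 65 91).map
              (fun y => String.ofList [Char.ofNat (a.toNat + 1), Char.ofNat y.toNat]))
              ++ pvTail (a.toNat + 1) := by
          rw [pvTail, pvTail]
          rw [PySem.List.pyRange_one_cons (by omega : (a.toNat : Int) + 1 < 91)]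
          rw [List.flatMap_cons]
          norm_cast
        rw [hmid, hmidA, htail]
        simp only [List.nil_append]
        have hA : Char.ofNat ((65:Int)).toNat = 'A' := by decide
        conv_rhs => rw [PySem.List.pyRange_one_cons (show (65:Int) < 91 by norm_num)]
        simp only [List.map_cons, List.cons_append, hA]
        norm_num
      · -- no carry: next state is [a, chr(ord(b)+1)]
        have hbz' : b.toNat ≠ 90 := by
          intro h90; exact hbz (char_eq_of_toNat b 'Z' (by rw [h90]; decide))
        have hstep : pvStepA (a :: b :: rest) = [a, Char.ofNat (b.toNat + 1)] := by
          rw [pvStepA, if_neg hbz]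
        have htb : (Char.ofNat (b.toNat + 1)).toNat = b.toNat + 1 :=
          char_toNat_ofNat _ (by omega)
        rw [hstep, IH a (Char.ofNat (b.toNat + 1)) [] ha (by omega) (Or.inl rfl) (by rw [htb]; omega)]
        rw [htb]
        congr 1
        rw [pvMid, pvMid]
        rw [PySem.List.pyRange_one_cons (by omega : (b.toNat : Int) + 1 < 91)]
        simp only [List.map_cons, List.cons_append]
        norm_cast

lemma pvFlat_length (length per : Int) (L : List String) :
    (L.flatMap (pvTickets length per)).length = L.length * per.toNat := by
  induction L with
  | nil => simp
  | cons s L IH => simp [IH, pvTickets_length]; ring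

lemma pvFlat_getD (length per : Int) (L : List String) (j : Nat) (hper : 0 < per.toNat)
    (hj : j < L.length * per.toNat) :
    (L.flatMap (pvTickets length per)).getD j "" =
      pvFmt length ((j % per.toNat : Nat) + 1) ++ " " ++ L.getD (j / per.toNat) "" := by
  induction L generalizing j with
  | nil => simp at hj
  | cons s L IH =>
    rw [List.flatMap_cons]
    by_cases hjp : j < per.toNat
    · rw [List.getD_append _ _ _ _ (by rw [pvTickets_length]; exact hjp)]
      rw [Nat.mod_eq_of_lt hjp, Nat.div_eq_of_lt hjp]
      simp only [List.getD_cons_zero]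
      rw [List.getD_eq_getElem _ _ (by rw [pvTickets_length]; exact hjp)]
      simp only [pvTickets, List.getElem_map, List.getElem_range]
    · obtain ⟨m, rfl⟩ : ∃ m, j = m + per.toNat := ⟨j - per.toNat, by omega⟩
      rw [List.getD_append_right _ _ _ _ (by rw [pvTickets_length]; omega)]
      rw [pvTickets_length]
      have hm : m + per.toNat - per.toNat = m := by omega
      rw [hm, IH m (by rw [List.length_cons, Nat.succ_mul] at hj; omega)]
      rw [Nat.add_mod_right, Nat.add_div_right _ hper, List.getD_cons_succ]

lemma pvB_eval (L : List String) (length per n : Int) (hper : 1 ≤ per) (h0 : 0 ≤ n)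
    (hn : n ≤ (L.length : Int) * per) :
    (PySem.List.pyRange 0 n).map (fun i =>
        pvFmt length (PySem.Int.mod i per + 1) ++ " "
          ++ PySem.List.pyGetD L (PySem.Int.floordiv i per) "")
      = (L.flatMap (pvTickets length per)).take n.toNat := by
  have hperN : per = (per.toNat : Int) := by omega
  have hLP : ((L.length * per.toNat : Nat) : Int) = (L.length : Int) * per := by
    push_cast
    rw [← hperN]
  apply List.ext_getElem
  · rw [List.length_map, PySem.List.length_pyRange_one, List.length_take, pvFlat_length]
    omega
  · intro i h1 h2
    rw [List.getElem_map, PySem.List.getElem_pyRange_one]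
    rw [List.getElem_take]
    have hi : (i : Int) < n := by
      have := h1; rw [List.length_map, PySem.List.length_pyRange_one] at this; omega
    have hiL : i < L.length * per.toNat := by
      have := h2; rw [List.length_take, pvFlat_length] at this; omega
    rw [← List.getD_eq_getElem _ "" (by rw [pvFlat_length]; exact hiL)]
    rw [pvFlat_getD length per L i (by omega) hiL]
    have e1 : (0 : Int) + i = ((i : Nat) : Int) := by omega
    rw [e1, hperN, PySem.Int.mod_natCast, PySem.Int.floordiv_natCast,
      PySem.List.pyGetD_natCast]
    simp only [Int.toNat_natCast]

-- pvOuterA with per = 0 yields nothing (A's inner generator is empty)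
lemma pvOuterA_per_zero (fuel : Nat) (count length : Int) (s : List Char) (total : Int) :
    pvOuterA fuel count 0 length s total = [] := by
  induction fuel generalizing s total with
  | zero => rfl
  | succ fuel IH =>
    rw [pvOuterA, pvInnerA, dif_neg (by omega)]
    simp only []
    split
    · rfl
    · split
      · rfl
      · rw [IH]; rfl

-- ===== VERDICT (by name: the statement is the Claim_ definition above) =====
lemma pvMain (count : Int) (series : String) (length : Int)
    (hPre : Pre_gen_ticket_number count series length) :
    gen_ticket_number count series length = gen_ticket_number_alt count series length := by
  obtain ⟨hlen0, hlen2, hor⟩ := hPre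
  set per : Int := 10 ^ length.toNat - 1 with hper
  have hper0 : 0 ≤ per := by
    have : (1:Int) ≤ 10 ^ length.toNat := one_le_pow₀ (by norm_num)
    omega
  -- decompose the upper-cased series
  obtain ⟨c0, c1, rest, hu⟩ : ∃ c0 c1 rest,
      (PySem.Str.upper series).toList = c0 :: c1 :: rest := by
    cases h1 : (PySem.Str.upper series).toList with
    | nil => rw [h1] at hlen2; simp at hlen2
    | cons c0 t =>
      cases t with
      | nil => rw [h1] at hlen2; simp at hlen2
      | cons c1 r => exact ⟨c0, c1, r, rfl⟩
  have hofl : String.ofList (c0 :: c1 :: rest) = PySem.Str.upper series := by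
    rw [← hu, String.ofList_toList]
  -- B's code, named
  set Lb : List String := PySem.Str.upper series :: (pvMid c0 c1.toNat ++ pvTail c0.toNat)
    with hLb
  have hBeq : gen_ticket_number_alt count series length =
      (PySem.List.pyRange 0 (min count ((Lb.length : Int) * per))).map (fun i =>
        pvFmt length (PySem.Int.mod i per + 1) ++ " "
          ++ PySem.List.pyGetD Lb (PySem.Int.floordiv i per) "") := by
    rw [gen_ticket_number_alt]
    simp only [hu, List.getD_cons_zero, List.getD_cons_succ, Char.ofNat_toNat,
      List.cons_append, List.nil_append]
    rw [hLb, pvMid, pvTail, ← hper]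
  have hAeq0 : gen_ticket_number count series length =
      pvOuterA 5000 count per length (c0 :: c1 :: rest) 0 := by
    rw [gen_ticket_number, ← hper, hu]
  by_cases hc0 : count < 0
  · -- count < 0: both sides are empty
    have hB : gen_ticket_number_alt count series length = [] := by
      rw [hBeq, PySem.List.pyRange_one_eq_nil (by omega : min count ((Lb.length : Int) * per) ≤ 0)]
      rfl
    rw [hB, hAeq0]
    by_cases hp1 : 0 < per
    · rw [show (5000 : Nat) = 4999 + 1 from rfl, pvOuterA]
      rw [pvInnerA, dif_pos hp1, if_pos (by omega : count ≤ 0)]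
      rfl
    · have : per = 0 := by omega
      rw [this, pvOuterA_per_zero]
  · rw [not_lt] at hc0
    -- count ≥ 0: characterize A through the chain
    have hA : gen_ticket_number count series length =
        ((pvChain 5000 (c0 :: c1 :: rest)).flatMap (pvTickets length per)).take count.toNat := by
      rw [hAeq0, pvOuterA_spec 5000 count per length _ 0 hper0 hc0, sub_zero]
    rcases hor with ⟨hg0, hg1, hg2⟩ | ⟨hl1, hcnt⟩
    · -- good series: the chain is exactly B's series table
      simp only [hu, List.getD_cons_zero, List.getD_cons_succ] at hg0 hg1 hg2
      have hrest : rest = [] ∨ ¬(c0 = 'Z' ∧ c1 = 'Z') := by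
        rcases hg2 with h | h
        · left
          have h0 : rest.length = 0 := by
            simp only [List.length_cons] at h
            omega
          exact List.length_eq_zero_iff.mp h0
        · right; exact h
      have hchain : pvChain 5000 (c0 :: c1 :: rest) = Lb := by
        rw [pvChain_two 5000 c0 c1 rest hg0 hg1 hrest (by omega), hofl]
      rw [hA, hchain, hBeq]
      by_cases hp1 : 0 < per
      · rw [pvB_eval Lb length per _ (by omega) (by positivity) (min_le_right _ _)]
        have hflen : ((Lb.flatMap (pvTickets length per)).length : Int) =
            (Lb.length : Int) * per := by
          rw [pvFlat_length]; push_cast; rw [Int.toNat_of_nonneg hper0]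
        by_cases hbig : count ≤ (Lb.length : Int) * per
        · rw [min_eq_left hbig]
        · rw [List.take_of_length_le (by omega), List.take_of_length_le (by omega)]
      · have hpz : per = 0 := by omega
        have hfl : Lb.flatMap (pvTickets length per) = [] := by
          apply List.eq_nil_of_length_eq_zero
          rw [pvFlat_length, hpz]
          simp
        have hm0 : min count ((Lb.length : Int) * per) = 0 := by
          rw [hpz, mul_zero]
          omega
        rw [hfl, hm0, PySem.List.pyRange_one_eq_nil (le_refl 0)]
        simp
    · -- count fits inside the first series: only its head is consumed on both sides
      have hp1 : (10:Int) ≤ 10 ^ length.toNat := by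
        calc (10:Int) = 10 ^ 1 := by norm_num
        _ ≤ 10 ^ length.toNat := pow_le_pow_right₀ (by norm_num) (by omega)
      have hcp : count < per := by omega
      have hLb1 : per ≤ (Lb.length : Int) * per :=
        le_mul_of_one_le_left hper0 (by simp [hLb]; omega)
      have hmin : min count ((Lb.length : Int) * per) = count := min_eq_left (by omega)
      rw [hBeq, hmin, pvB_eval Lb length per count (by omega) hc0 (by omega)]
      rw [hA]
      rw [show (5000 : Nat) = 4999 + 1 from rfl, pvChain]
      simp only [List.flatMap_cons, hofl]
      have htk : count.toNat ≤ (pvTickets length per (PySem.Str.upper series)).length := by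
        rw [pvTickets_length]; omega
      rw [hLb, List.flatMap_cons]
      rw [List.take_append_of_le_length htk, List.take_append_of_le_length htk]

theorem gen_ticket_number_spec : Claim_equal_gen_ticket_number := by
  intro count series length _hDom hPre
  exact pvMain count series length hPre
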